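-- pv_equiv track=rewrite | github.com/Boot-Camp-Coding-Test/Programmers | day10(주말용)/푸라블럼3/[김창동] 비밀지도.py | solution
-- ===== SOURCE A (Python) =====
-- def solution(n, arr1, arr2):
--     result = []
--
--     for a, b in zip(arr1, arr2):
--         a = bin(a)[2:].zfill(n) # 이진변환, 뒤 0채워넣기
--         b = bin(b)[2:].zfill(n)
--         hash_ = ''
--
--         for x, y in zip(a, b):  # 한개씩 잘라 값 집어넣기
--             x, y = int(x), int(y)
--             if x == y == 0:     # 둘다 0일때 제외 모두 #
--                 hash_ += ' '
--             else:
--                 hash_ += '#'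
--
--         result.append(hash_)
--     return result
-- ===== SOURCE B (Python) =====
-- def solution(n, arr1, arr2):
--     to_wall = str.maketrans('10', '# ')
--     return [bin(a | b)[2:].zfill(n).translate(to_wall) for a, b in zip(arr1, arr2)]
-- ===== Notes on version B (the rewrite author's own statement) =====
-- stated objective: idiomatic
-- what changed: A's per-character inner loop (binary-expand both numbers, zip the two digit strings, int() each character and compare) is replaced by one integer bitwise OR per row followed by a single zfill + translate string transform; Pre_ excludes rows with a negative value (A raises ValueError) and rows whose two values render to digit strings of different widths (one value needs more than max(n,1) bits and the other does not, possible only outside the problem's stated 0 <= value < 2^n domain), where A's zip of unequal-length strings silently truncates the row, an artefact of A's implementation. …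
-- outside the precondition, e.g. on solution(2, [4], [0]): A returns ['# '], B returns ['#  ']; on solution(0, [1], [3]): A returns ['#'], B returns ['##']
import Mathlib
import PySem

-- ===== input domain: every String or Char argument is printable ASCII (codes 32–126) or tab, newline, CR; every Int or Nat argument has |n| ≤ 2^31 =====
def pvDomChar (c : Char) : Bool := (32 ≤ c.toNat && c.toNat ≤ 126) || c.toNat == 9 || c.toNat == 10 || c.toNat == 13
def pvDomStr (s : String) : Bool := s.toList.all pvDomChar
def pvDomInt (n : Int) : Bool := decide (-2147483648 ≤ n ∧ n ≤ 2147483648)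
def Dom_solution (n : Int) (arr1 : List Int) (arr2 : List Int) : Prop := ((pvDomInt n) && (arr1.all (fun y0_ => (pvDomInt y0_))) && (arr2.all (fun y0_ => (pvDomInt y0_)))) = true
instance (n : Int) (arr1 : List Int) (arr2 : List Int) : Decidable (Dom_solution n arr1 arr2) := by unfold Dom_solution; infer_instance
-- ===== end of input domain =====

-- B replaces A's per-character inner loop (zip two digit strings, int() each character, compare)
-- by one integer bitwise OR per row and a single zfill + translate transform (objective: idiomatic);
-- equality is claimed on the inputs admitted by Pre_ below. Return values only.

-- ===== PORT A =====
-- one row of A: a = bin(a)[2:].zfill(n); b likewise; then the inner zip loop building hash_.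
-- int(x) is PySem.Int.ofChars? (none = ValueError, where Python A raises; excluded by Pre_).
def pvRowA (n : Int) (a b : Int) : List Char :=
  let ac := PySem.Chars.zfill (PySem.List.slice (PySem.Int.toBinChars0b a) (some 2) none) n
  let bc := PySem.Chars.zfill (PySem.List.slice (PySem.Int.toBinChars0b b) (some 2) none) n
  (ac.zip bc).foldl (fun hash_ xy =>
      if PySem.Int.ofChars? [xy.1] = some 0 ∧ PySem.Int.ofChars? [xy.2] = some 0
      then hash_ ++ [' '] else hash_ ++ ['#']) []

def solution (n : Int) (arr1 : List Int) (arr2 : List Int) : List String :=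
  (arr1.zip arr2).foldl (fun result ab => result ++ [String.ofList (pvRowA n ab.1 ab.2)]) []

-- ===== PORT B =====
-- one row of B: bin(a | b)[2:].zfill(n).translate(str.maketrans('10', '# ')); translate maps
-- '1' to '#', '0' to ' ' and leaves any other character unchanged.
def pvRowB (n : Int) (a b : Int) : List Char :=
  (PySem.Chars.zfill (PySem.List.slice (PySem.Int.toBinChars0b (PySem.Int.bor a b)) (some 2) none) n).map
    (fun c => if c = '1' then '#' else if c = '0' then ' ' else c)

def solution_alt (n : Int) (arr1 : List Int) (arr2 : List Int) : List String :=
  (arr1.zip arr2).map (fun ab => String.ofList (pvRowB n ab.1 ab.2))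

-- ===== PRECONDITION & SPEC =====
-- Pre_ excludes exactly (a) rows holding a negative value, where A raises ValueError (int('b') on
-- bin's sign prefix), and (b) rows whose two values render to digit strings of different widths
-- under zfill(n) (one value needs more than max(n,1) bits and the other does not), where A's zip
-- of the two unequal-length strings silently truncates the row — an artefact of A's implementation
-- on inputs outside the problem's stated domain (the problem guarantees 0 ≤ value < 2^n).
-- max (Nat.size v) 1 is the width of bin(v)[2:] for v ≥ 0 (Nat.size = Python's int.bit_length).
def Pre_solution (n : Int) (arr1 : List Int) (arr2 : List Int) : Prop :=
  ∀ p ∈ arr1.zip arr2, 0 ≤ p.1 ∧ 0 ≤ p.2 ∧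
    max n.toNat (max (Nat.size p.1.toNat) 1) = max n.toNat (max (Nat.size p.2.toNat) 1)
instance (n : Int) (arr1 : List Int) (arr2 : List Int) : Decidable (Pre_solution n arr1 arr2) := by
  unfold Pre_solution; infer_instance

def pvWitness_solution : Int × List Int × List Int := (5, [9, 20, 28, 18, 11], [30, 1, 21, 17, 28])

def Spec_solution (n : Int) (arr1 : List Int) (arr2 : List Int) (out : List String) : Prop := out = solution_alt n arr1 arr2
instance (n : Int) (arr1 : List Int) (arr2 : List Int) (out : List String) : Decidable (Spec_solution n arr1 arr2 out) := by unfold Spec_solution; infer_instance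

-- ===== CLAIM (what is proved, stated in full; the proofs are below) =====
def Claim_equal_solution : Prop := ∀ (n : Int) (arr1 : List Int) (arr2 : List Int), Dom_solution n arr1 arr2 → Pre_solution n arr1 arr2 → Spec_solution n arr1 arr2 (solution n arr1 arr2)

-- ===== LEMMAS AND PROOFS =====

-- the binary digit string of k, MSB first, as Nat.toDigits 2 produces it (bin(k)[2:] for k ≥ 0)
def pvBits (k : Nat) : List Char :=
  if _h : k < 2 then [Nat.digitChar k] else pvBits (k / 2) ++ [Nat.digitChar (k % 2)]
  termination_by k
  decreasing_by omega

-- the N-wide, MSB-first zero-padded rendering of k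
def pvD (N k : Nat) : List Char :=
  (List.range N).map (fun i => if k.testBit (N - 1 - i) then '1' else '0')

lemma pvToDigitsCore_eq (fuel : Nat) : ∀ (k : Nat) (ds : List Char), 0 < fuel → k < 2 ^ fuel →
    Nat.toDigitsCore 2 fuel k ds = pvBits k ++ ds := by
  induction fuel with
  | zero => omega
  | succ m ih =>
    intro k ds _ h
    rw [Nat.toDigitsCore]
    by_cases h2 : k / 2 = 0
    · simp only [h2, if_true]
      conv_rhs => rw [pvBits]
      have hk : k < 2 := by omega
      rw [dif_pos hk, Nat.mod_eq_of_lt hk]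
      simp
    · simp only [h2, if_false]
      have hk2 : k / 2 < 2 ^ m := by rw [pow_succ] at h; omega
      have hm : 0 < m := by
        rcases Nat.eq_zero_or_pos m with hm | hm
        · subst hm; norm_num at h; omega
        · exact hm
      rw [ih (k / 2) _ hm hk2]
      conv_rhs => rw [pvBits]
      rw [dif_neg (by omega : ¬ k < 2)]
      simp

lemma pvToDigits_two (k : Nat) : Nat.toDigits 2 k = pvBits k := by
  have := pvToDigitsCore_eq (k + 1) k [] (by omega) (Nat.lt_two_pow_self.trans_le (Nat.pow_le_pow_right (by norm_num) (by omega)))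
  simpa [Nat.toDigits] using this

lemma pvBits_mem (k : Nat) : ∀ c ∈ pvBits k, c = '0' ∨ c = '1' := by
  induction k using Nat.strong_induction_on with
  | _ k ih =>
    intro c hc
    rw [pvBits] at hc
    by_cases h : k < 2
    · rw [dif_pos h] at hc
      interval_cases k <;> simp_all [Nat.digitChar]
    · rw [dif_neg h] at hc
      rcases List.mem_append.mp hc with h1 | h1
      · exact ih (k / 2) (by omega) c h1
      · have : k % 2 < 2 := Nat.mod_lt _ (by omega)
        interval_cases hm : k % 2 <;> simp_all [Nat.digitChar]

lemma pvBits_ne_nil (k : Nat) : pvBits k ≠ [] := by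
  rw [pvBits]; split <;> simp

-- the length of bin(k)[2:] is Python's k.bit_length() floored at 1
lemma pvBits_length (k : Nat) : (pvBits k).length = max (Nat.size k) 1 := by
  induction k using Nat.strong_induction_on with
  | _ k ih =>
    rw [pvBits]
    by_cases h : k < 2
    · rw [dif_pos h]
      interval_cases k <;> simp [Nat.size_zero, Nat.size_one]
    · rw [dif_neg h]
      have hk2 : 1 ≤ k / 2 := by omega
      have hs : Nat.size k = Nat.size (k / 2) + 1 := by
        have h1 : Nat.size (k / 2) ≤ Nat.size k - 1 := by
          rw [Nat.size_le]
          have hk : k < 2 ^ Nat.size k := Nat.lt_size_self k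
          have hp : 1 ≤ Nat.size k := Nat.size_pos.mpr (by omega)
          rw [show Nat.size k = (Nat.size k - 1) + 1 by omega, pow_succ] at hk
          omega
        have h2 : Nat.size k ≤ Nat.size (k / 2) + 1 := by
          have hk : k / 2 < 2 ^ Nat.size (k / 2) := Nat.lt_size_self (k / 2)
          exact Nat.size_le.mpr (by rw [pow_succ]; omega)
        have hp : 1 ≤ Nat.size k := Nat.size_pos.mpr (by omega)
        omega
      have := ih (k / 2) (by omega)
      have hsp : 1 ≤ Nat.size (k / 2) := Nat.size_pos.mpr (by omega)
      simp only [List.length_append, List.length_singleton]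
      omega

lemma pvBits_lt (k : Nat) : k < 2 ^ (pvBits k).length := by
  rw [pvBits_length]
  exact (Nat.lt_size_self k).trans_le (Nat.pow_le_pow_right (by norm_num) (le_max_left _ _))

lemma pvBits_len_le (M k : Nat) (hM : 1 ≤ M) (hk : k < 2 ^ M) : (pvBits k).length ≤ M := by
  rw [pvBits_length]
  have := Nat.size_le.mpr hk
  omega

lemma pvD_length (N k : Nat) : (pvD N k).length = N := by simp [pvD]

lemma pvD_zero_val (N : Nat) : pvD N 0 = List.replicate N '0' := by
  simp [pvD]

lemma pvD_succ (N k : Nat) : pvD (N + 1) k = pvD N (k / 2) ++ [if k % 2 = 1 then '1' else '0'] := by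
  simp only [pvD, List.range_succ, List.map_append, List.map_cons, List.map_nil]
  congr 1
  · apply List.map_congr_left
    intro i hi
    have hi' : i < N := List.mem_range.mp hi
    have : N + 1 - 1 - i = (N - 1 - i) + 1 := by omega
    rw [this, Nat.testBit_succ]
  · have : N + 1 - 1 - N = 0 := by omega
    rw [this, Nat.testBit_zero]
    simp

lemma pvPad_eq (N : Nat) : ∀ k, 1 ≤ N → k < 2 ^ N →
    List.replicate (N - (pvBits k).length) '0' ++ pvBits k = pvD N k := by
  induction N with
  | zero => omega
  | succ M ih =>
    intro k _ hk
    by_cases hM : M = 0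
    · subst hM
      have h2 : k < 2 := by simpa using hk
      rw [pvBits, dif_pos h2]
      simp [pvD]
      interval_cases k <;> simp [Nat.digitChar]
    · by_cases h2 : k < 2
      · rw [pvBits, dif_pos h2, pvD_succ]
        have : k / 2 = 0 := by omega
        rw [this, pvD_zero_val]
        interval_cases k <;> simp [Nat.digitChar]
      · rw [pvBits, dif_neg h2, pvD_succ]
        have hk2 : k / 2 < 2 ^ M := by
          rw [pow_succ] at hk; omega
        have hih := ih (k / 2) (by omega) hk2
        have hlen : (pvBits (k / 2)).length ≤ M := by
          have := congrArg List.length hih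
          simp [pvD_length] at this
          omega
        have hmod : Nat.digitChar (k % 2) = if k % 2 = 1 then '1' else '0' := by
          have : k % 2 < 2 := Nat.mod_lt _ (by omega)
          interval_cases hm : k % 2 <;> simp [Nat.digitChar]
        rw [hmod, ← hih]
        rw [List.length_append]
        simp only [List.length_singleton]
        rw [show M + 1 - ((pvBits (k / 2)).length + 1) = M - (pvBits (k / 2)).length by omega]
        simp [List.append_assoc]

lemma pvZfill_eq (cs : List Char) (w : Int) (hne : cs ≠ [])
    (hd : ∀ c ∈ cs, c = '0' ∨ c = '1') :
    PySem.Chars.zfill cs w = List.replicate (w.toNat - cs.length) '0' ++ cs := by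
  rw [PySem.Chars.zfill.eq_def]
  by_cases h : w ≤ (cs.length : Int)
  · rw [if_pos h, show w.toNat - cs.length = 0 by omega]
    simp
  · rw [if_neg h]
    cases cs with
    | nil => simp at hne
    | cons c rest =>
      have hc := hd c (List.mem_cons_self ..)
      have : ¬ (c = '+' ∨ c = '-') := by rcases hc with h | h <;> subst h <;> decide
      simp only [this, if_false]

-- bin(k)[2:].zfill(w) renders k at width max(w, bit string length)
lemma pvZfillBin (w : Int) (a : Int) (ha0 : 0 ≤ a) :
    PySem.Chars.zfill (PySem.List.slice (PySem.Int.toBinChars0b a) (some 2) none) w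
      = pvD (max w.toNat (pvBits a.toNat).length) a.toNat := by
  rw [PySem.Int.toBinChars0b, if_neg (by omega), PySem.List.slice_from _ (by norm_num)]
  simp only [show ((2:Int)).toNat = 2 from rfl, List.drop_succ_cons, List.drop_zero, pvToDigits_two]
  rw [pvZfill_eq _ _ (pvBits_ne_nil _) (pvBits_mem _)]
  have h1 : 1 ≤ (pvBits a.toNat).length := by
    cases h : pvBits a.toNat with
    | nil => exact absurd h (pvBits_ne_nil _)
    | cons c l => simp
  have hlt : a.toNat < 2 ^ max w.toNat (pvBits a.toNat).length :=
    (pvBits_lt a.toNat).trans_le (Nat.pow_le_pow_right (by norm_num) (le_max_right _ _))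
  have := pvPad_eq (max w.toNat (pvBits a.toNat).length) a.toNat (by omega) hlt
  rw [← this, show max w.toNat (pvBits a.toNat).length - (pvBits a.toNat).length
        = w.toNat - (pvBits a.toNat).length by omega]

-- pairing two same-width digit strings through A's int()-comparison = B's translate of the OR's digits
lemma pvMap_eq (N ka kb : Nat) :
    ((pvD N ka).zip (pvD N kb)).map
        (fun xy => if PySem.Int.ofChars? [xy.1] = some 0 ∧ PySem.Int.ofChars? [xy.2] = some 0
                   then ' ' else '#')
      = (pvD N (ka ||| kb)).map (fun c => if c = '1' then '#' else if c = '0' then ' ' else c) := by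
  unfold pvD
  rw [List.zip_map', List.map_map, List.map_map]
  apply List.map_congr_left
  intro i _
  simp only [Function.comp]
  by_cases hA : ka.testBit (N - 1 - i) <;> by_cases hB : kb.testBit (N - 1 - i) <;>
    simp [hA, hB] <;> decide

-- the row A renders equals the row B renders, for nonnegative values of equal rendered width
lemma pvRow_eq (n a b : Int) (ha0 : 0 ≤ a) (hb0 : 0 ≤ b)
    (hw : max n.toNat (max (Nat.size a.toNat) 1) = max n.toNat (max (Nat.size b.toNat) 1)) :
    pvRowA n a b = pvRowB n a b := by
  obtain ⟨a', rfl⟩ : ∃ k : Nat, a = (k : Int) := ⟨a.toNat, (Int.toNat_of_nonneg ha0).symm⟩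
  obtain ⟨b', rfl⟩ : ∃ k : Nat, b = (k : Int) := ⟨b.toNat, (Int.toNat_of_nonneg hb0).symm⟩
  simp only [Int.toNat_natCast] at hw
  rw [← pvBits_length, ← pvBits_length] at hw
  -- the common width W of the two rendered rows
  set W := max n.toNat (pvBits a').length with hW
  have h1a : 1 ≤ (pvBits a').length := by
    cases h : pvBits a' with
    | nil => exact absurd h (pvBits_ne_nil _)
    | cons c l => simp
  have hW1 : 1 ≤ W := by omega
  -- the OR also renders at width W
  have haW : a' < 2 ^ W :=
    (pvBits_lt a').trans_le (Nat.pow_le_pow_right (by norm_num) (by omega))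
  have hbW : b' < 2 ^ W := by
    refine (pvBits_lt b').trans_le (Nat.pow_le_pow_right (by norm_num) ?_)
    omega
  have hcW : a' ||| b' < 2 ^ W := Nat.or_lt_two_pow haW hbW
  have hcle : (pvBits (a' ||| b')).length ≤ W := pvBits_len_le W _ hW1 hcW
  have hcge : (pvBits a').length ≤ (pvBits (a' ||| b')).length := by
    rw [pvBits_length, pvBits_length]
    have := Nat.size_le_size (show a' ≤ a' ||| b' from Nat.left_le_or)
    omega
  have hWor : max n.toNat (pvBits (a' ||| b')).length = W := by omega
  -- render all three values through pvZfillBin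
  simp only [pvRowA, pvRowB]
  rw [show PySem.Int.bor ((a' : Nat) : Int) ((b' : Nat) : Int) = (((a' ||| b') : Nat) : Int) from
      PySem.Int.bor_natCast _ _]
  rw [pvZfillBin n (a' : Int) (by positivity), pvZfillBin n (b' : Int) (by positivity),
      pvZfillBin n (((a' ||| b') : Nat) : Int) (by positivity)]
  simp only [Int.toNat_natCast]
  rw [hWor, ← hW, ← hw]
  -- A's inner loop as a map over the full-length zip of the two width-W rows
  have hfold : (fun (hash_ : List Char) (xy : Char × Char) =>
      if PySem.Int.ofChars? [xy.1] = some 0 ∧ PySem.Int.ofChars? [xy.2] = some 0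
      then hash_ ++ [' '] else hash_ ++ ['#'])
      = (fun hash_ xy => hash_ ++
          [if PySem.Int.ofChars? [xy.1] = some 0 ∧ PySem.Int.ofChars? [xy.2] = some 0
           then ' ' else '#']) := by
    funext h xy; split <;> rfl
  rw [hfold, PySem.List.foldl_append_singleton_eq_map, List.nil_append]
  exact pvMap_eq W a' b'

-- ===== VERDICT (by name: the statement is the Claim_ definition above) =====
theorem solution_spec : Claim_equal_solution := by
  intro n arr1 arr2 _ hpre
  unfold Spec_solution solution solution_alt
  rw [PySem.List.foldl_append_singleton_eq_map, List.nil_append]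
  apply List.map_congr_left
  intro p hp
  obtain ⟨h1, h2, h3⟩ := hpre p hp
  rw [pvRow_eq n p.1 p.2 h1 h2 h3]
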